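-- pv_equiv track=rewrite | github.com/quinoxy/Rectangular-Packing | main.py | naiveapproach2
-- ===== SOURCE A (Python) =====
-- def naiveapproach2(gate_dimensions):
--     gates = {}
--     maxi = 0
--     x = 0
--     y = 0
--     for i in gate_dimensions.items():
--         gates[i[0]] = [x , y]
--         y+=i[1][1]
--         maxi = max(maxi , i[1][0])
--     gates = {'bounding_box' : [maxi , y] , **gates}
--     return gates
-- ===== SOURCE B (Python) =====
-- def naiveapproach2(gate_dimensions):
--     items = list(gate_dimensions.items())
--     heights = [dims[1] for _, dims in items]
--     offsets = []
--     total = 0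
--     for h in heights:
--         offsets.append(total)
--         total += h
--     maxi = max([0, *[dims[0] for _, dims in items]])
--     result = {'bounding_box': [maxi, total]}
--     for (name, _), off in zip(items, offsets):
--         result[name] = [0, off]
--     return result
-- ===== Notes on version B (the rewrite author's own statement) =====
-- stated objective: alternative
-- what changed: A places gates while accumulating the running y-offset and max width in one interleaved loop; B first builds a prefix-offset table (plus the total height and the clamped max width) and then, in a separate pass, zips the items with the table to place each gate, creating the result dict with 'bounding_box' first.
import Mathlib
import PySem

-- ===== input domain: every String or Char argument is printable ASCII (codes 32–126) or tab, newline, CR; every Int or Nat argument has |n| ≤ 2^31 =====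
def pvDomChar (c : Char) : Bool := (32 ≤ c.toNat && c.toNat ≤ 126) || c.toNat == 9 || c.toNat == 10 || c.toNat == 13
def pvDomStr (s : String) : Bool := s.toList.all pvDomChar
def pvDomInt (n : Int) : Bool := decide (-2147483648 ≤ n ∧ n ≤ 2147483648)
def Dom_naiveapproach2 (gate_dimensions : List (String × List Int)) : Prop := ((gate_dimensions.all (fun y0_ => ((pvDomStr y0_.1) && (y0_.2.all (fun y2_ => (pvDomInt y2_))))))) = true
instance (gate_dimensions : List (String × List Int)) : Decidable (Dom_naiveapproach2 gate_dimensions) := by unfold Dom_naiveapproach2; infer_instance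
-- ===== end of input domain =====

-- B replaces A's single interleaved place-and-accumulate loop by a precomputed
-- prefix-offset table plus a separate placing pass (same cost, different decomposition).

-- ===== PORT A =====
def naiveapproach2 (gate_dimensions : List (String × List Int)) : List (String × List Int) :=
  let st := gate_dimensions.foldl
    (fun (st : PySem.Dict String (List Int) × Int × Int × Int) i =>
      (st.1.insert i.1 [st.2.2.1, st.2.2.2],
       max st.2.1 ((PySem.List.pyGet? i.2 0).getD 0),
       st.2.2.1,
       st.2.2.2 + (PySem.List.pyGet? i.2 1).getD 0))
    (PySem.Dict.empty, 0, 0, 0)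
  -- {'bounding_box' : [maxi , y] , **gates}
  (st.1.items.foldl (fun d p => d.insert p.1 p.2)
    ((PySem.Dict.empty : PySem.Dict String (List Int)).insert "bounding_box" [st.2.1, st.2.2.2])).items

-- ===== PORT B =====
def naiveapproach2_alt (gate_dimensions : List (String × List Int)) : List (String × List Int) :=
  let heights := gate_dimensions.map (fun p => (PySem.List.pyGet? p.2 1).getD 0)
  -- offsets/total: prefix-sum table of the heights
  let ot := heights.foldl (fun (st : List Int × Int) h => (st.1 ++ [st.2], st.2 + h)) ([], 0)
  -- max([0, *widths])
  let maxi := (gate_dimensions.map (fun p => (PySem.List.pyGet? p.2 0).getD 0)).foldl max 0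
  let base := (PySem.Dict.empty : PySem.Dict String (List Int)).insert "bounding_box" [maxi, ot.2]
  ((gate_dimensions.zip ot.1).foldl (fun d q => d.insert q.1.1 [0, q.2]) base).items

-- ===== PRECONDITION & SPEC =====
-- Pre_ excludes association lists with duplicate keys (A's parameter is a Python dict, which
-- collapses them before A runs, so such lists correspond to no dict input) and inner lists of
-- length < 2 (A raises IndexError on i[1][1]).
def Pre_naiveapproach2 (gate_dimensions : List (String × List Int)) : Prop :=
  (gate_dimensions.map Prod.fst).Nodup ∧ ∀ p ∈ gate_dimensions, 2 ≤ p.2.length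
instance (gate_dimensions : List (String × List Int)) : Decidable (Pre_naiveapproach2 gate_dimensions) := by unfold Pre_naiveapproach2; infer_instance

def pvWitness_naiveapproach2 : (List (String × List Int)) := [("a", [1, 2]), ("b", [3, 4])]

def Spec_naiveapproach2 (gate_dimensions : List (String × List Int)) (out : List (String × List Int)) : Prop := out = naiveapproach2_alt gate_dimensions
instance (gate_dimensions : List (String × List Int)) (out : List (String × List Int)) : Decidable (Spec_naiveapproach2 gate_dimensions out) := by unfold Spec_naiveapproach2; infer_instance

-- ===== CLAIM (what is proved, stated in full; the proofs are below) =====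
def Claim_equal_naiveapproach2 : Prop := ∀ (gate_dimensions : List (String × List Int)), Dom_naiveapproach2 gate_dimensions → Pre_naiveapproach2 gate_dimensions → Spec_naiveapproach2 gate_dimensions (naiveapproach2 gate_dimensions)

-- ===== LEMMAS AND PROOFS =====
theorem pvB_offsets (hs : List Int) : ∀ (acc : List Int) (y : Int),
    hs.foldl (fun (st : List Int × Int) h => (st.1 ++ [st.2], st.2 + h)) (acc, y) =
      (acc ++ (hs.foldl (fun (st : List Int × Int) h => (st.1 ++ [st.2], st.2 + h)) ([], y)).1,
       y + hs.sum) := by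
  induction hs with
  | nil => intro acc y; simp
  | cons h t ih =>
    intro acc y
    simp only [List.foldl_cons, List.sum_cons]
    rw [ih (acc ++ [y]) (y + h), ih ([] ++ [y]) (y + h)]
    simp [List.append_assoc]
    omega

def pvPlace (y : Int) : List (String × List Int) → List (String × List Int)
  | [] => []
  | p :: ps => (p.1, [0, y]) :: pvPlace (y + (PySem.List.pyGet? p.2 1).getD 0) ps

theorem pvB_zip (gd : List (String × List Int)) :
    ∀ (y : Int) (d : PySem.Dict String (List Int)),
    ((gd.zip ((gd.map (fun p => (PySem.List.pyGet? p.2 1).getD 0)).foldl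
        (fun (st : List Int × Int) h => (st.1 ++ [st.2], st.2 + h)) ([], y)).1).foldl
      (fun d q => d.insert q.1.1 [0, q.2]) d) =
    ((pvPlace y gd).foldl (fun d p => d.insert p.1 p.2) d) := by
  induction gd with
  | nil => intro y d; simp [pvPlace]
  | cons p ps ih =>
    intro y d
    simp only [List.map_cons, List.foldl_cons, pvPlace]
    rw [pvB_offsets _ ([] ++ [y]) (y + (PySem.List.pyGet? p.2 1).getD 0)]
    simp only [List.nil_append, List.singleton_append, List.zip_cons_cons, List.foldl_cons]
    exact ih _ _

theorem pvA_fold (gd : List (String × List Int)) :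
    ∀ (g : PySem.Dict String (List Int)) (m y : Int),
    (gd.map Prod.fst).Nodup → g.keys.Nodup → (∀ p ∈ gd, g.contains p.1 = false) →
    (gd.foldl
      (fun (st : PySem.Dict String (List Int) × Int × Int × Int) i =>
        (st.1.insert i.1 [st.2.2.1, st.2.2.2],
         max st.2.1 ((PySem.List.pyGet? i.2 0).getD 0),
         st.2.2.1,
         st.2.2.2 + (PySem.List.pyGet? i.2 1).getD 0))
      (g, m, 0, y)).1.items = g.items ++ pvPlace y gd ∧
    (gd.foldl
      (fun (st : PySem.Dict String (List Int) × Int × Int × Int) i =>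
        (st.1.insert i.1 [st.2.2.1, st.2.2.2],
         max st.2.1 ((PySem.List.pyGet? i.2 0).getD 0),
         st.2.2.1,
         st.2.2.2 + (PySem.List.pyGet? i.2 1).getD 0))
      (g, m, 0, y)).2 =
      ((gd.map (fun p => (PySem.List.pyGet? p.2 0).getD 0)).foldl max m, 0,
        y + (gd.map (fun p => (PySem.List.pyGet? p.2 1).getD 0)).sum) := by
  induction gd with
  | nil => intro g m y _ _ _; simp [pvPlace]
  | cons p ps ih =>
    intro g m y hnd hgk hdisj
    simp only [List.map_cons, List.foldl_cons, pvPlace, List.sum_cons]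
    have hpc : g.contains p.1 = false := hdisj p (List.mem_cons_self ..)
    have hnd' : (ps.map Prod.fst).Nodup := (List.nodup_cons.mp hnd).2
    have hgk' : (g.insert p.1 [0, y]).keys.Nodup := PySem.Dict.nodup_keys_insert _ _ _ hgk
    have hdisj' : ∀ q ∈ ps, (g.insert p.1 [0, y]).contains q.1 = false := by
      intro q hq
      rw [PySem.Dict.contains_insert]
      have hne : q.1 ≠ p.1 := by
        intro he
        exact (List.nodup_cons.mp hnd).1 (he ▸ List.mem_map_of_mem hq)
      simp [hne, hdisj q (List.mem_cons_of_mem _ hq)]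
    obtain ⟨h1, h2⟩ := ih (g.insert p.1 [0, y]) (max m ((PySem.List.pyGet? p.2 0).getD 0))
      (y + (PySem.List.pyGet? p.2 1).getD 0) hnd' hgk' hdisj'
    constructor
    · rw [h1, PySem.Dict.items_insert_of_not_contains (h := hpc)]
      simp [List.append_assoc]
    · rw [h2]
      simp only [Prod.mk.injEq]
      refine ⟨trivial, trivial, by omega⟩

-- ===== VERDICT (by name: the statement is the Claim_ definition above) =====
theorem naiveapproach2_spec : Claim_equal_naiveapproach2 := by
  intro gd _ hpre
  obtain ⟨hnd, _⟩ := hpre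
  show naiveapproach2 gd = naiveapproach2_alt gd
  obtain ⟨h1, h2⟩ := pvA_fold gd PySem.Dict.empty 0 0 hnd (by simp) (by intro p _; simp)
  simp only [naiveapproach2, naiveapproach2_alt]
  rw [h1, h2, pvB_zip gd 0,
    pvB_offsets (gd.map (fun p => (PySem.List.pyGet? p.2 1).getD 0)) [] 0]
  simp [PySem.Dict.empty]
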